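-- pv_equiv track=rewrite | github.com/Hoffalo/fight-matchmaker | models/feature_selection.py | _consensus_sets
-- ===== SOURCE A (Python) =====
-- from collections import Counter
--
-- def _consensus_sets(
--     top_mi: list[str],
--     top_rfe: list[str],
--     top_l1: list[str],
--     top_xgb: list[str],
-- ) -> list[tuple[str, int]]:
--     votes: Counter[str] = Counter()
--     for group in (top_mi, top_rfe, top_l1, top_xgb):
--         for name in group:
--             votes[name] += 1
--     consensus = [(n, c) for n, c in votes.items() if c >= 2]
--     consensus.sort(key=lambda t: (-t[1], t[0]))
--     return consensus
-- ===== SOURCE B (Python) =====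
-- def _consensus_sets(
--     top_mi: list[str],
--     top_rfe: list[str],
--     top_l1: list[str],
--     top_xgb: list[str],
-- ) -> list[tuple[str, int]]:
--     # Sort the concatenation, then run-length scan maximal runs of equal names.
--     names = sorted(top_mi + top_rfe + top_l1 + top_xgb)
--     out: list[tuple[str, int]] = []
--     i = 0
--     n = len(names)
--     while i < n:
--         j = i + 1
--         while j < n and names[j] == names[i]:
--             j += 1
--         if j - i >= 2:
--             out.append((names[i], j - i))
--         i = j
--     out.sort(key=lambda t: (-t[1], t[0]))
--     return out
-- ===== Notes on version B (the rewrite author's own statement) =====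
-- stated objective: alternative
-- what changed: Replaces the Counter hash-count over four separate loops by sort-then-run-length-scan: the concatenated names are sorted once and maximal runs of equal names are counted in a single linear scan, no dictionary at all.
import Mathlib
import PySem

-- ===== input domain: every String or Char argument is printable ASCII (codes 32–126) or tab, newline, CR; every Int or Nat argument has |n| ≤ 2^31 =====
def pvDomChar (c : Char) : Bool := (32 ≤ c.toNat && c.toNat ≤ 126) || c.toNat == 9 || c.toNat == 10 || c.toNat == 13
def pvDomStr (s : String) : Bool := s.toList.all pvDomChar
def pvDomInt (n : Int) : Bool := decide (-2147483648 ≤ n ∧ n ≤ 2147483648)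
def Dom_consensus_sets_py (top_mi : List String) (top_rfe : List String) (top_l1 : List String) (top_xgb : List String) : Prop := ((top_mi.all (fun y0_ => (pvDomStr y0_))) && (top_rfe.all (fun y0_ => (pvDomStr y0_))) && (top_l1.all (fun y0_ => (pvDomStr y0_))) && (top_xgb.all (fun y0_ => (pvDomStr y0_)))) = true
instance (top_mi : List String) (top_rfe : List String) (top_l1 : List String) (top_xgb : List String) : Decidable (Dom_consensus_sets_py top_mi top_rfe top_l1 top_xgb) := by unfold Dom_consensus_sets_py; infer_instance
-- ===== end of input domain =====

-- B replaces A's Counter-dict voting pass by sort-then-run-length-scan (alternative algorithm, same cost class).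

-- ===== PORT A =====
def consensus_sets_py (top_mi : List String) (top_rfe : List String) (top_l1 : List String) (top_xgb : List String) : List (String × Int) :=
  PySem.List.sorted2
    (([top_mi, top_rfe, top_l1, top_xgb].foldl
        (fun votes group => group.foldl (fun votes name => votes.modify name 0 (fun c => c + 1)) votes)
        PySem.Dict.empty).items.filter (fun t => 2 ≤ t.2))
    (fun t => -t.2) (fun t => t.1)

-- ===== PORT B =====
-- run-length scan over the sorted name list (the two nested `while` loops of Source B)
def pvRuns : List String → List (String × Int)
  | [] => []
  | x :: t =>
    if 2 ≤ (1 + ((t.takeWhile (fun y => y == x)).length : Int)) then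
      (x, 1 + ((t.takeWhile (fun y => y == x)).length : Int)) :: pvRuns (t.dropWhile (fun y => y == x))
    else pvRuns (t.dropWhile (fun y => y == x))
termination_by l => l.length
decreasing_by
  all_goals simpa using Nat.lt_succ_of_le (List.length_dropWhile_le _ _)

def consensus_sets_py_alt (top_mi : List String) (top_rfe : List String) (top_l1 : List String) (top_xgb : List String) : List (String × Int) :=
  PySem.List.sorted2
    (pvRuns (PySem.List.sorted (top_mi ++ top_rfe ++ top_l1 ++ top_xgb) (fun x => x)))
    (fun t => -t.2) (fun t => t.1)

-- ===== PRECONDITION & SPEC =====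
def Spec_consensus_sets_py (top_mi : List String) (top_rfe : List String) (top_l1 : List String) (top_xgb : List String) (out : List (String × Int)) : Prop := out = consensus_sets_py_alt top_mi top_rfe top_l1 top_xgb
instance (top_mi : List String) (top_rfe : List String) (top_l1 : List String) (top_xgb : List String) (out : List (String × Int)) : Decidable (Spec_consensus_sets_py top_mi top_rfe top_l1 top_xgb out) := by unfold Spec_consensus_sets_py; infer_instance

-- ===== CLAIM (what is proved, stated in full; the proofs are below) =====
def Claim_equal_consensus_sets_py : Prop := ∀ (top_mi : List String) (top_rfe : List String) (top_l1 : List String) (top_xgb : List String), Dom_consensus_sets_py top_mi top_rfe top_l1 top_xgb → Spec_consensus_sets_py top_mi top_rfe top_l1 top_xgb (consensus_sets_py top_mi top_rfe top_l1 top_xgb)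

-- ===== LEMMAS AND PROOFS =====

-- in a ≤-sorted list, takeWhile (== x) at the head captures every occurrence of x
lemma pv_not_mem_dropWhile_beq {x : String} {t : List String}
    (ht : t.Pairwise (· ≤ ·)) (hx : ∀ z ∈ t, x ≤ z) :
    x ∉ t.dropWhile (fun y => y == x) := by
  induction t with
  | nil => simp
  | cons y t' ih =>
    by_cases h : (y == x) = true
    · simp only [List.dropWhile_cons, h, if_true]
      exact ih ht.tail (fun z hz => hx z (List.mem_cons_of_mem _ hz))
    · simp only [List.dropWhile_cons, h]
      intro hmem
      rcases List.mem_cons.1 hmem with rfl | hmem'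
      · simp at h
      · have h1 : y ≤ x := (List.pairwise_cons.1 ht).1 x hmem'
        have h2 : x ≤ y := hx y (List.mem_cons_self)
        have : y = x := le_antisymm h1 h2
        simp [this] at h

-- characterisation of the run-length scan on a ≤-sorted list
lemma pvRuns_mem : ∀ (s : List String), s.Pairwise (· ≤ ·) → ∀ p : String × Int,
    p ∈ pvRuns s ↔ p.1 ∈ s ∧ p.2 = (s.count p.1 : Int) ∧ 2 ≤ p.2 := by
  intro s
  induction s using pvRuns.induct with
  | case1 => intro _ p; rw [pvRuns]; simp
  | case2 x t hcond ih =>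
    intro hs p
    have hrun : ∀ z ∈ t.takeWhile (fun y => y == x), z = x := by
      intro z hz
      have := List.mem_takeWhile_imp hz
      simpa using this
    have hx : ∀ z ∈ t, x ≤ z := (List.pairwise_cons.1 hs).1
    have hnx : x ∉ t.dropWhile (fun y => y == x) :=
      pv_not_mem_dropWhile_beq (List.pairwise_cons.1 hs).2 hx
    have hrest_pw : (t.dropWhile (fun y => y == x)).Pairwise (· ≤ ·) :=
      (List.pairwise_cons.1 hs).2.sublist (List.dropWhile_sublist _)
    have hsplit : t.takeWhile (fun y => y == x) ++ t.dropWhile (fun y => y == x) = t :=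
      List.takeWhile_append_dropWhile
    have hcx : (x :: t).count x = 1 + (t.takeWhile (fun y => y == x)).length := by
      have h1 : (t.takeWhile (fun y => y == x)).count x = (t.takeWhile (fun y => y == x)).length :=
        List.count_eq_length.2 (fun b hb => (hrun b hb).symm)
      have h2 : (t.dropWhile (fun y => y == x)).count x = 0 :=
        List.count_eq_zero.2 hnx
      have ht : t.count x = (t.takeWhile (fun y => y == x)).count x + (t.dropWhile (fun y => y == x)).count x := by
        conv_lhs => rw [← hsplit]
        exact List.count_append ..
      simp [List.count_cons_self, ht, h1, h2, Nat.add_comm]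
    have hck : ∀ k : String, k ≠ x → (x :: t).count k = (t.dropWhile (fun y => y == x)).count k := by
      intro k hk
      have h1 : (t.takeWhile (fun y => y == x)).count k = 0 :=
        List.count_eq_zero.2 (fun hmem => hk (hrun k hmem))
      have ht : t.count k = (t.takeWhile (fun y => y == x)).count k + (t.dropWhile (fun y => y == x)).count k := by
        conv_lhs => rw [← hsplit]
        exact List.count_append ..
      simp [Ne.symm hk, ht, h1]
    have hmem_rest : ∀ k : String, k ∈ t.dropWhile (fun y => y == x) → k ∈ t :=
      fun k hk => (List.dropWhile_sublist _).mem hk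
    have hmem_t : ∀ k : String, k ≠ x → k ∈ t → k ∈ t.dropWhile (fun y => y == x) := by
      intro k hk hkt
      rw [← hsplit] at hkt
      rcases List.mem_append.1 hkt with h | h
      · exact absurd (hrun k h) hk
      · exact h
    have ihp := ih hrest_pw
    rw [pvRuns, if_pos hcond]
    constructor
    · intro hp
      rcases List.mem_cons.1 hp with rfl | hp'
      · refine ⟨List.mem_cons_self, ?_, hcond⟩
        simp [hcx]
      · obtain ⟨h1, h2, h3⟩ := (ihp p).1 hp'
        have hne : p.1 ≠ x := fun h => hnx (h ▸ h1)
        exact ⟨List.mem_cons_of_mem _ (hmem_rest _ h1),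
          by rw [hck p.1 hne]; exact h2, h3⟩
    · rintro ⟨h1, h2, h3⟩
      by_cases hpx : p.1 = x
      · have hp2 : p.2 = 1 + ((t.takeWhile (fun y => y == x)).length : Int) := by
          rw [h2, hpx, hcx]; push_cast; ring
        obtain ⟨p1, p2⟩ := p
        simp only at hpx hp2
        subst hpx; subst hp2
        exact List.mem_cons_self
      · right
        apply (ihp p).2
        refine ⟨?_, ?_, h3⟩
        · rcases List.mem_cons.1 h1 with h | h
          · exact absurd h hpx
          · exact hmem_t _ hpx h
        · rw [h2, hck p.1 hpx]
  | case3 x t hcond ih =>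
    intro hs p
    have hrun : ∀ z ∈ t.takeWhile (fun y => y == x), z = x := by
      intro z hz
      have := List.mem_takeWhile_imp hz
      simpa using this
    have hx : ∀ z ∈ t, x ≤ z := (List.pairwise_cons.1 hs).1
    have hnx : x ∉ t.dropWhile (fun y => y == x) :=
      pv_not_mem_dropWhile_beq (List.pairwise_cons.1 hs).2 hx
    have hrest_pw : (t.dropWhile (fun y => y == x)).Pairwise (· ≤ ·) :=
      (List.pairwise_cons.1 hs).2.sublist (List.dropWhile_sublist _)
    have hsplit : t.takeWhile (fun y => y == x) ++ t.dropWhile (fun y => y == x) = t :=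
      List.takeWhile_append_dropWhile
    have hcx : (x :: t).count x = 1 + (t.takeWhile (fun y => y == x)).length := by
      have h1 : (t.takeWhile (fun y => y == x)).count x = (t.takeWhile (fun y => y == x)).length :=
        List.count_eq_length.2 (fun b hb => (hrun b hb).symm)
      have h2 : (t.dropWhile (fun y => y == x)).count x = 0 :=
        List.count_eq_zero.2 hnx
      have ht : t.count x = (t.takeWhile (fun y => y == x)).count x + (t.dropWhile (fun y => y == x)).count x := by
        conv_lhs => rw [← hsplit]
        exact List.count_append ..
      simp [List.count_cons_self, ht, h1, h2, Nat.add_comm]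
    have hck : ∀ k : String, k ≠ x → (x :: t).count k = (t.dropWhile (fun y => y == x)).count k := by
      intro k hk
      have h1 : (t.takeWhile (fun y => y == x)).count k = 0 :=
        List.count_eq_zero.2 (fun hmem => hk (hrun k hmem))
      have ht : t.count k = (t.takeWhile (fun y => y == x)).count k + (t.dropWhile (fun y => y == x)).count k := by
        conv_lhs => rw [← hsplit]
        exact List.count_append ..
      simp [Ne.symm hk, ht, h1]
    have hmem_rest : ∀ k : String, k ∈ t.dropWhile (fun y => y == x) → k ∈ t :=
      fun k hk => (List.dropWhile_sublist _).mem hk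
    have hmem_t : ∀ k : String, k ≠ x → k ∈ t → k ∈ t.dropWhile (fun y => y == x) := by
      intro k hk hkt
      rw [← hsplit] at hkt
      rcases List.mem_append.1 hkt with h | h
      · exact absurd (hrun k h) hk
      · exact h
    have ihp := ih hrest_pw
    rw [pvRuns, if_neg hcond]
    constructor
    · intro hp
      obtain ⟨h1, h2, h3⟩ := (ihp p).1 hp
      have hne : p.1 ≠ x := fun h => hnx (h ▸ h1)
      exact ⟨List.mem_cons_of_mem _ (hmem_rest _ h1),
        by rw [hck p.1 hne]; exact h2, h3⟩
    · rintro ⟨h1, h2, h3⟩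
      by_cases hpx : p.1 = x
      · exfalso
        apply hcond
        calc (2 : Int) ≤ p.2 := h3
          _ = ((x :: t).count x : Int) := by rw [h2, hpx]
          _ = 1 + ((t.takeWhile (fun y => y == x)).length : Int) := by rw [hcx]; push_cast; ring
      · apply (ihp p).2
        refine ⟨?_, ?_, h3⟩
        · rcases List.mem_cons.1 h1 with h | h
          · exact absurd h hpx
          · exact hmem_t _ hpx h
        · rw [h2, hck p.1 hpx]

-- the emitted names are distinct
lemma pvRuns_nodup_fst : ∀ (s : List String), s.Pairwise (· ≤ ·) →
    ((pvRuns s).map Prod.fst).Nodup := by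
  intro s
  induction s using pvRuns.induct with
  | case1 => intro _; simp [pvRuns]
  | case2 x t hcond ih =>
    intro hs
    have hx : ∀ z ∈ t, x ≤ z := (List.pairwise_cons.1 hs).1
    have hnx : x ∉ t.dropWhile (fun y => y == x) :=
      pv_not_mem_dropWhile_beq (List.pairwise_cons.1 hs).2 hx
    have hrest_pw : (t.dropWhile (fun y => y == x)).Pairwise (· ≤ ·) :=
      (List.pairwise_cons.1 hs).2.sublist (List.dropWhile_sublist _)
    rw [pvRuns, if_pos hcond]
    simp only [List.map_cons, List.nodup_cons]
    refine ⟨?_, ih hrest_pw⟩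
    intro hmem
    obtain ⟨q, hq, hq1⟩ := List.mem_map.1 hmem
    have := ((pvRuns_mem _ hrest_pw q).1 hq).1
    rw [hq1] at this
    exact hnx this
  | case3 x t hcond ih =>
    intro hs
    have hrest_pw : (t.dropWhile (fun y => y == x)).Pairwise (· ≤ ·) :=
      (List.pairwise_cons.1 hs).2.sublist (List.dropWhile_sublist _)
    rw [pvRuns, if_neg hcond]
    exact ih hrest_pw

-- sorted2 with keys k1, k2 is sorted with the lexicographic key
lemma pv_sorted2_eq_sorted_lex {α : Type} (xs : List α) (k1 : α → Int) (k2 : α → String) :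
    PySem.List.sorted2 xs k1 k2 = PySem.List.sorted xs (fun x => toLex (k1 x, k2 x)) := by
  have hb : (fun a b => decide (k1 a < k1 b) || (!decide (k1 b < k1 a) && decide (k2 a < k2 b)))
      = (fun a b => decide (toLex (k1 a, k2 a) < toLex (k1 b, k2 b))) := by
    funext a b
    by_cases h1 : k1 a < k1 b
    · simp [h1, Prod.Lex.toLex_lt_toLex, asymm h1]
    · by_cases h2 : k1 b < k1 a
      · simp [h1, h2, Prod.Lex.toLex_lt_toLex, ne_of_gt h2]
      · have he : k1 a = k1 b := le_antisymm (not_lt.1 h2) (not_lt.1 h1)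
        simp [Prod.Lex.toLex_lt_toLex, he]
  rw [PySem.List.sorted_eq_foldl_insertBy]
  simp only [PySem.List.sorted2, Bool.false_eq_true, if_false, hb]

-- ===== VERDICT (by name: the statement is the Claim_ definition above) =====
theorem consensus_sets_py_spec : Claim_equal_consensus_sets_py := by
  intro top_mi top_rfe top_l1 top_xgb _
  unfold Spec_consensus_sets_py consensus_sets_py consensus_sets_py_alt
  set L := top_mi ++ top_rfe ++ top_l1 ++ top_xgb with hL
  have hv : [top_mi, top_rfe, top_l1, top_xgb].foldl
      (fun votes group => group.foldl (fun votes name => votes.modify name 0 (fun c => c + 1)) votes)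
      PySem.Dict.empty = PySem.Dict.counter L := by
    simp [PySem.Dict.counter_eq_foldl, hL, List.foldl_append]
  rw [hv]
  have hA : (PySem.Dict.counter L).items.filter (fun t => 2 ≤ t.2)
      = ((PySem.Set.ofList L).filter (fun k => 2 ≤ (L.count k : Int))).map
          (fun k => (k, (L.count k : Int))) := by
    rw [PySem.Dict.items_counter, List.filter_map]
    rfl
  rw [hA]
  set names := PySem.List.sorted L (fun x => x) with hn
  have hpw : names.Pairwise (· ≤ ·) := PySem.List.sorted_pairwise L (fun x => x)
  have hnp : names.Perm L := PySem.List.sorted_perm L (fun x => x) false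
  -- the two unsorted candidate lists are permutations of each other
  have hperm : (((PySem.Set.ofList L).filter (fun k => 2 ≤ (L.count k : Int))).map
      (fun k => (k, (L.count k : Int)))).Perm (pvRuns names) := by
    rw [List.perm_ext_iff_of_nodup]
    · intro p
      rw [pvRuns_mem names hpw p]
      simp only [List.mem_map, List.mem_filter, PySem.Set.mem_ofList, decide_eq_true_eq]
      constructor
      · rintro ⟨k, ⟨hk1, hk2⟩, rfl⟩
        exact ⟨hnp.mem_iff.2 hk1, by rw [hnp.count_eq], hk2⟩
      · rintro ⟨h1, h2, h3⟩
        refine ⟨p.1, ⟨hnp.mem_iff.1 h1, ?_⟩, ?_⟩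
        · rw [← hnp.count_eq]; rw [h2] at h3; exact h3
        · rw [← hnp.count_eq, ← h2]
    · exact ((PySem.Set.nodup_ofList L).filter _).map
        (fun a b h => congrArg Prod.fst h)
    · exact List.Nodup.of_map Prod.fst (pvRuns_nodup_fst names hpw)
  rw [pv_sorted2_eq_sorted_lex, pv_sorted2_eq_sorted_lex]
  apply PySem.List.eq_of_perm_of_pairwise_le_of_injective (fun t => toLex (-t.2, t.1))
  · intro p q h
    have h' : (-p.2, p.1) = (-q.2, q.1) := toLex.injective h
    obtain ⟨p1, p2⟩ := p; obtain ⟨q1, q2⟩ := q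
    simp only [Prod.mk.injEq] at h'
    simp [h'.2, neg_inj.1 h'.1]
  · exact ((PySem.List.sorted_perm _ _ _).trans hperm).trans
      (PySem.List.sorted_perm _ _ _).symm
  · exact PySem.List.sorted_pairwise _ _
  · exact PySem.List.sorted_pairwise _ _
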